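-- pv_equiv track=rewrite | github.com/pacoman-258/rag_papers_by_AI | local_paper_db/app/search_service.py | dedupe_model_ids
-- ===== SOURCE A (Python) =====
-- def dedupe_model_ids(items: list[str]) -> list[str]:
--     normalized: list[str] = []
--     seen: set[str] = set()
--     for item in items:
--         value = str(item or "").strip()
--         if not value:
--             continue
--         lowered = value.casefold()
--         if lowered in seen:
--             continue
--         seen.add(lowered)
--         normalized.append(value)
--     return sorted(normalized, key=str.casefold)
-- ===== SOURCE B (Python) =====
-- def dedupe_model_ids(items: list[str]) -> list[str]:
--     normalized = [v for v in (str(item or "").strip() for item in items) if v]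
--     ordered = sorted(normalized, key=str.casefold)
--     out: list[str] = []
--     last = None
--     for value in ordered:
--         lowered = value.casefold()
--         if lowered != last:
--             out.append(value)
--             last = lowered
--     return out
-- ===== Notes on version B (the rewrite author's own statement) =====
-- stated objective: alternative
-- what changed: Replaces A's seen-set with no dedup structure at all: B sorts the normalized values stably by casefold and then removes case-insensitive duplicates in one adjacency pass, relying on sort stability to keep the first-in-input casing.
import Mathlib
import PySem

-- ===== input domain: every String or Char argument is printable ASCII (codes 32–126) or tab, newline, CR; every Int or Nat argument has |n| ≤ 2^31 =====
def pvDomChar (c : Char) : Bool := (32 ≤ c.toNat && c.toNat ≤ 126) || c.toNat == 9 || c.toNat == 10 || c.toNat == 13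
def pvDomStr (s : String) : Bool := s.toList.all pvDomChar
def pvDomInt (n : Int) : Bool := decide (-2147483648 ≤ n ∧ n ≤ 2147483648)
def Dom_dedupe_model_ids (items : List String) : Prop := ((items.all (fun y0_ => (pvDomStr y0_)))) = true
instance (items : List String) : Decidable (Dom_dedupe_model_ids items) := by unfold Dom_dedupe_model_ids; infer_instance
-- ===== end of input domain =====

-- B replaces A's seen-set bookkeeping by sort-then-adjacent-dedup (stable sort by casefold, then one pass
-- keeping the first element of each casefold run); an alternative decomposition of the same task.
-- On the ASCII input domain str.casefold coincides with str.lower, so both ports use PySem.Str.lower for it.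

-- ===== PORT A =====
def dedupe_model_ids (items : List String) : List String :=
  let st := items.foldl (fun st item =>
      let value := PySem.Str.strip (if item = "" then "" else item)   -- str(item or "").strip()
      if value = "" then st
      else
        let lowered := PySem.Str.lower value                          -- value.casefold(), exact on ASCII
        if st.2.contains lowered then st
        else (st.1 ++ [value], st.2.add lowered))
    (([], PySem.Set.empty) : List String × PySem.Set String)
  PySem.List.sorted st.1 PySem.Str.lower

-- ===== PORT B =====
-- B's final pass: keep a value only when its casefold differs from the last kept casefold.
def pvDedupAdj (last : Option String) : List String → List String
  | [] => []
  | value :: rest =>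
    let lowered := PySem.Str.lower value                              -- value.casefold(), exact on ASCII
    if some lowered = last then pvDedupAdj last rest
    else value :: pvDedupAdj (some lowered) rest

def dedupe_model_ids_alt (items : List String) : List String :=
  let normalized := (items.map (fun item => PySem.Str.strip (if item = "" then "" else item))).filter
      (fun v => !(v == ""))
  let ordered := PySem.List.sorted normalized PySem.Str.lower
  pvDedupAdj none ordered

-- ===== PRECONDITION & SPEC =====
def Spec_dedupe_model_ids (items : List String) (out : List String) : Prop := out = dedupe_model_ids_alt items
instance (items : List String) (out : List String) : Decidable (Spec_dedupe_model_ids items out) := by unfold Spec_dedupe_model_ids; infer_instance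

-- ===== CLAIM (what is proved, stated in full; the proofs are below) =====
def Claim_equal_dedupe_model_ids : Prop := ∀ (items : List String), Dom_dedupe_model_ids items → Spec_dedupe_model_ids items (dedupe_model_ids items)

-- ===== LEMMAS AND PROOFS =====

-- A's loop, re-expressed as a fold over the already-normalized non-empty values.
def pvFoldV (st : List String × PySem.Set String) : List String → List String × PySem.Set String
  | [] => st
  | v :: vs =>
    if st.2.contains (PySem.Str.lower v) then pvFoldV st vs
    else pvFoldV (st.1 ++ [v], st.2.add (PySem.Str.lower v)) vs

lemma pvFoldA_eq (items : List String) (st : List String × PySem.Set String) :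
    List.foldl (fun st item =>
      let value := PySem.Str.strip (if item = "" then "" else item)
      if value = "" then st
      else
        let lowered := PySem.Str.lower value
        if st.2.contains lowered then st
        else (st.1 ++ [value], st.2.add lowered)) st items
    = pvFoldV st ((items.map (fun item => PySem.Str.strip (if item = "" then "" else item))).filter
        (fun v => !(v == ""))) := by
  induction items generalizing st with
  | nil => rfl
  | cons x xs ih =>
    simp only [List.foldl_cons, ih, List.map_cons, List.filter_cons]
    by_cases hv : PySem.Str.strip (if x = "" then "" else x) = ""
    · simp [hv]
    · simp only [hv]
      simp [pvFoldV, hv]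
      exact apply_ite (fun s => pvFoldV s _) _ _ _

-- filter of A's accumulated list, per casefold key k: the first not-yet-seen value of each class survives
lemma pvFoldV_filter (vs : List String) (ns : List String) (seen : PySem.Set String) (k : String) :
    (pvFoldV (ns, seen) vs).1.filter (fun s => PySem.Str.lower s == k)
    = ns.filter (fun s => PySem.Str.lower s == k)
      ++ (if k ∈ seen then [] else (vs.filter (fun s => PySem.Str.lower s == k)).take 1) := by
  induction vs generalizing ns seen with
  | nil => simp [pvFoldV]
  | cons v vs ih =>
    by_cases hc : PySem.Str.lower v ∈ seen
    · rw [pvFoldV, if_pos (by simpa using hc), ih, List.filter_cons]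
      by_cases hk : PySem.Str.lower v = k
      · subst hk; simp [hc]
      · simp [hk]
    · rw [pvFoldV, if_neg (by simpa using hc), ih, List.filter_cons, List.filter_append,
        List.filter_cons]
      by_cases hk : PySem.Str.lower v = k
      · subst hk; simp [hc]
      · have hne : ¬ k = PySem.Str.lower v := fun h => hk h.symm
        simp [hk, or_iff_left hne]

-- the insertion step of PySem's stable sort preserves key-sortedness
lemma pvIns_pairwise (x : String) (acc : List String)
    (h : acc.Pairwise (fun a b => PySem.Str.lower a ≤ PySem.Str.lower b)) :
    (PySem.List.insertBy (fun a b => decide (PySem.Str.lower a < PySem.Str.lower b)) x acc).Pairwise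
      (fun a b => PySem.Str.lower a ≤ PySem.Str.lower b) := by
  induction acc with
  | nil => simp [PySem.List.insertBy]
  | cons y ys ih =>
    rcases List.pairwise_cons.1 h with ⟨hy, hys⟩
    rw [PySem.List.insertBy]
    by_cases hlt : PySem.Str.lower x < PySem.Str.lower y
    · rw [if_pos (by simpa using hlt)]
      refine List.pairwise_cons.2 ⟨?_, h⟩
      intro z hz
      rcases List.mem_cons.1 hz with rfl | hz
      · exact le_of_lt hlt
      · exact le_trans (le_of_lt hlt) (hy z hz)
    · rw [if_neg (by simpa using hlt)]
      refine List.pairwise_cons.2 ⟨?_, ih hys⟩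
      intro z hz
      rcases (PySem.List.mem_insertBy _ x z ys).1 hz with rfl | hz
      · exact le_of_not_gt hlt
      · exact hy z hz

-- inserting into a key-sorted list appends x at the END of its key class (this is stability)
lemma pvIns_filter (x : String) (acc : List String) (k : String)
    (h : acc.Pairwise (fun a b => PySem.Str.lower a ≤ PySem.Str.lower b)) :
    (PySem.List.insertBy (fun a b => decide (PySem.Str.lower a < PySem.Str.lower b)) x acc).filter
        (fun s => PySem.Str.lower s == k)
    = if PySem.Str.lower x == k then acc.filter (fun s => PySem.Str.lower s == k) ++ [x]
      else acc.filter (fun s => PySem.Str.lower s == k) := by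
  induction acc with
  | nil => rw [PySem.List.insertBy]; split_ifs with hk <;> simp_all
  | cons y ys ih =>
    rcases List.pairwise_cons.1 h with ⟨hy, hys⟩
    rw [PySem.List.insertBy]
    by_cases hlt : PySem.Str.lower x < PySem.Str.lower y
    · rw [if_pos (by simpa using hlt), List.filter_cons]
      by_cases hk : PySem.Str.lower x = k
      · subst hk
        have hnil : (y :: ys).filter (fun s => PySem.Str.lower s == PySem.Str.lower x) = [] := by
          rw [List.filter_eq_nil_iff]
          intro z hz
          have hlt2 : PySem.Str.lower x < PySem.Str.lower z := by
            rcases List.mem_cons.1 hz with rfl | hz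
            · exact hlt
            · exact lt_of_lt_of_le hlt (hy z hz)
          simp [(ne_of_gt hlt2)]
        simp [hnil]
      · simp [hk]
    · rw [if_neg (by simpa using hlt), List.filter_cons, List.filter_cons, ih hys]
      by_cases hyk : PySem.Str.lower y = k <;> by_cases hk : PySem.Str.lower x = k <;>
        simp [hyk, hk]

lemma pvSort_filter_aux (vs : List String) (acc : List String) (k : String)
    (h : acc.Pairwise (fun a b => PySem.Str.lower a ≤ PySem.Str.lower b)) :
    (vs.foldl (fun acc x =>
        PySem.List.insertBy (fun a b => decide (PySem.Str.lower a < PySem.Str.lower b)) x acc) acc).filter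
        (fun s => PySem.Str.lower s == k)
    = acc.filter (fun s => PySem.Str.lower s == k) ++ vs.filter (fun s => PySem.Str.lower s == k) := by
  induction vs generalizing acc with
  | nil => simp
  | cons v vs ih =>
    rw [List.foldl_cons, ih _ (pvIns_pairwise v acc h), pvIns_filter v acc k h, List.filter_cons]
    by_cases hk : PySem.Str.lower v = k <;> simp [hk]

-- STABILITY of PySem's sort: each casefold class is preserved verbatim (order and casing)
lemma pvSort_filter (xs : List String) (k : String) :
    (PySem.List.sorted xs PySem.Str.lower).filter (fun s => PySem.Str.lower s == k)
    = xs.filter (fun s => PySem.Str.lower s == k) := by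
  rw [PySem.List.sorted_eq_foldl_insertBy, pvSort_filter_aux xs [] k (by simp)]
  simp

-- members surviving pvDedupAdj (some m) have key strictly above m (on a key-sorted tail)
lemma pvAdj_mem_lt (l : List String) (m : String)
    (hs : l.Pairwise (fun a b => PySem.Str.lower a ≤ PySem.Str.lower b))
    (hm : ∀ y ∈ l, m ≤ PySem.Str.lower y) :
    ∀ z ∈ pvDedupAdj (some m) l, m < PySem.Str.lower z := by
  induction l generalizing m with
  | nil => simp [pvDedupAdj]
  | cons v vs ih =>
    rcases List.pairwise_cons.1 hs with ⟨hv, hvs⟩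
    rw [pvDedupAdj]
    by_cases he : PySem.Str.lower v = m
    · rw [if_pos (by simp [he])]
      exact ih m hvs (fun y hy => hm y (List.mem_cons_of_mem v hy))
    · rw [if_neg (by simp [he])]
      intro z hz
      have hmv : m < PySem.Str.lower v :=
        lt_of_le_of_ne (hm v (List.mem_cons_self)) (fun h => he h.symm)
      rcases List.mem_cons.1 hz with rfl | hz
      · exact hmv
      · exact lt_trans hmv (ih (PySem.Str.lower v) hvs hv z hz)

lemma pvAdj_pairwise (l : List String) (last : Option String)
    (hs : l.Pairwise (fun a b => PySem.Str.lower a ≤ PySem.Str.lower b)) :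
    (pvDedupAdj last l).Pairwise (fun a b => PySem.Str.lower a < PySem.Str.lower b) := by
  induction l generalizing last with
  | nil => simp [pvDedupAdj]
  | cons v vs ih =>
    rcases List.pairwise_cons.1 hs with ⟨hv, hvs⟩
    rw [pvDedupAdj]
    by_cases he : some (PySem.Str.lower v) = last
    · rw [if_pos he]; exact ih last hvs
    · rw [if_neg he]
      exact List.pairwise_cons.2 ⟨pvAdj_mem_lt vs (PySem.Str.lower v) hvs hv, ih _ hvs⟩

-- adjacent dedup on a key-sorted list keeps exactly the first element of each key class
lemma pvAdj_filter (l : List String) (last : Option String) (k : String)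
    (hs : l.Pairwise (fun a b => PySem.Str.lower a ≤ PySem.Str.lower b))
    (hm : ∀ m, last = some m → ∀ y ∈ l, m ≤ PySem.Str.lower y)
    (hne : last ≠ some k) :
    (pvDedupAdj last l).filter (fun s => PySem.Str.lower s == k)
    = (l.filter (fun s => PySem.Str.lower s == k)).take 1 := by
  induction l generalizing last with
  | nil => simp [pvDedupAdj]
  | cons v vs ih =>
    rcases List.pairwise_cons.1 hs with ⟨hv, hvs⟩
    rw [pvDedupAdj, List.filter_cons]
    by_cases he : some (PySem.Str.lower v) = last
    · rw [if_pos he]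
      have hvk : ¬ (PySem.Str.lower v = k) := by
        intro h; exact hne (h ▸ he.symm)
      rw [ih last hvs (fun m hm' y hy => hm m hm' y (List.mem_cons_of_mem v hy)) hne]
      simp [hvk]
    · rw [if_neg he, List.filter_cons]
      by_cases hk : PySem.Str.lower v = k
      · subst hk
        have hnil : (pvDedupAdj (some (PySem.Str.lower v)) vs).filter
            (fun s => PySem.Str.lower s == PySem.Str.lower v) = [] := by
          rw [List.filter_eq_nil_iff]
          intro z hz
          exact by simp [ne_of_gt (pvAdj_mem_lt vs (PySem.Str.lower v) hvs hv z hz)]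
        simp [hnil]
      · rw [ih (some (PySem.Str.lower v)) hvs (fun m hm' => by injection hm' with h; exact h ▸ hv)
          (by simp [hk])]
        simp [hk]

-- every casefold class contributes the same single representative on both sides, hence a permutation
lemma pvPerm (norm : List String) :
    (pvDedupAdj none (PySem.List.sorted norm PySem.Str.lower)).Perm
      ((pvFoldV ([], PySem.Set.empty) norm).1) := by
  rw [List.perm_iff_count]
  intro a
  rw [← List.count_filter (p := fun s => PySem.Str.lower s == PySem.Str.lower a) (a := a)
      (l := pvDedupAdj none (PySem.List.sorted norm PySem.Str.lower)) (by simp),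
    ← List.count_filter (p := fun s => PySem.Str.lower s == PySem.Str.lower a) (a := a)
      (l := (pvFoldV ([], PySem.Set.empty) norm).1) (by simp)]
  rw [pvAdj_filter _ none _ (PySem.List.sorted_pairwise _ _) (by simp) (by simp)]
  rw [pvSort_filter]
  rw [pvFoldV_filter]
  simp [PySem.Set.empty]

-- ===== VERDICT (by name: the statement is the Claim_ definition above) =====
theorem dedupe_model_ids_spec : Claim_equal_dedupe_model_ids := by
  intro items _
  unfold Spec_dedupe_model_ids dedupe_model_ids dedupe_model_ids_alt
  rw [pvFoldA_eq]
  exact PySem.List.sorted_eq_of_perm_of_pairwise_lt _ _ _ (pvPerm _)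
    (pvAdj_pairwise _ _ (PySem.List.sorted_pairwise _ _))
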